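-- pv_equiv track=rewrite | github.com/LegalMarc/marcut | src/python/marcut/pipeline.py | _find_last_top_level_separator
-- ===== SOURCE A (Python) =====
-- from typing import List, Dict, Any, Tuple, Optional, Callable, TypedDict
--
-- def _find_last_top_level_separator(text: str) -> Optional[int]:
--     """Find the last separator in text that isn't nested in parentheses."""
--     depth = 0
--     for i in range(len(text) - 1, -1, -1):
--         ch = text[i]
--         if ch == ")":
--             depth += 1
--             continue
--         if ch == "(":
--             if depth > 0:
--                 depth -= 1
--             continue
--         if depth != 0:
--             continue
--         # Separators: comma, semicolon, colon
--         # Added: Forward slash (e.g. "Name/Title")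
--         # Added: Period? No, period is risky if it's "Inc."
--         if ch in {",", ";", ":", "/"}:
--             return i
--         if ch in {"\u2013", "\u2014"}: # dashes
--             return i
--         if ch == "-" and i > 0 and i + 1 < len(text):
--             # Only treat hyphen as separator if surrounded by spaces " - "
--             if text[i - 1].isspace() and text[i + 1].isspace():
--                 return i
--     return None
-- ===== SOURCE B (Python) =====
-- from typing import Optional
--
-- def _find_last_top_level_separator(text: str) -> Optional[int]:
--     """Two-pass version: a backward pass records, per position, whether it is
--     nested in parentheses; a forward pass keeps the last top-level separator."""
--     n = len(text)
--     nested = [True] * n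
--     depth = 0
--     for i in range(n - 1, -1, -1):
--         ch = text[i]
--         if ch == ")":
--             depth += 1
--         elif ch == "(":
--             if depth > 0:
--                 depth -= 1
--         else:
--             nested[i] = depth != 0
--     best = None
--     for i, ch in enumerate(text):
--         if nested[i]:
--             continue
--         if ch in ",;:/" or ch in "\u2013\u2014":
--             best = i
--         elif ch == "-" and 0 < i < n - 1 and text[i - 1].isspace() and text[i + 1].isspace():
--             best = i
--     return best
-- ===== Notes on version B (the rewrite author's own statement) =====
-- stated objective: alternative
-- what changed: A is a single reverse scan that tracks parenthesis depth and early-returns at the first separator it meets; B decomposes the task into a backward pass that materialises a per-position nested-in-parentheses mask and a forward pass that keeps the last unmasked separator index.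
import Mathlib
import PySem

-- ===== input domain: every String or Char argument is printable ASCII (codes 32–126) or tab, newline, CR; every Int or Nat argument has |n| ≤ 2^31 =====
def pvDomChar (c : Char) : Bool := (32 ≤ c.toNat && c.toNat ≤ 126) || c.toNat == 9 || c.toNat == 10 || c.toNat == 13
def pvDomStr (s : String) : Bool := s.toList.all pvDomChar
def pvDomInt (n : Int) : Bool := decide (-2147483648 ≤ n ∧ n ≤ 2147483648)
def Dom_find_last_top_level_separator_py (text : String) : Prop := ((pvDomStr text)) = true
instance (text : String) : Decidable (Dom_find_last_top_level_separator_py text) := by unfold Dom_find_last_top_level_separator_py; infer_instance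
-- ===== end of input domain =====

-- B is an alternative decomposition of the same O(n) task: a backward pass that records a
-- nesting mask, then a forward pass keeping the last top-level separator (A is a single
-- reverse scan with early return). Same result on every input; not claimed faster.

-- ===== PORT A =====
-- A's reverse for-loop: recursion over the reversed remaining prefix, index i counting down,
-- depth threaded exactly as in the Python.
def pvFindDown (cs : List Char) : List Char → Int → Int → Option Int
  | [], _, _ => none
  | ch :: rest, i, depth =>
    if ch = ')' then pvFindDown cs rest (i - 1) (depth + 1)
    else if ch = '(' then pvFindDown cs rest (i - 1) (if depth > 0 then depth - 1 else depth)
    else if depth ≠ 0 then pvFindDown cs rest (i - 1) depth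
    else if ch = ',' ∨ ch = ';' ∨ ch = ':' ∨ ch = '/' then some i
    else if ch = '–' ∨ ch = '—' then some i
    else if ch = '-' ∧ 0 < i ∧ i + 1 < (cs.length : Int)
            ∧ (PySem.List.pyGet? cs (i - 1)).any PySem.Chars.isspace = true
            ∧ (PySem.List.pyGet? cs (i + 1)).any PySem.Chars.isspace = true then some i
    else pvFindDown cs rest (i - 1) depth

def find_last_top_level_separator_py (text : String) : Option Int :=
  let cs := text.toList
  pvFindDown cs cs.reverse ((cs.length : Int) - 1) 0

-- ===== PORT B =====
-- backward pass of Source B: processes characters right to left, returning the final depth and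
-- the nested-mask (parenthesis positions keep their initial True).
def pvScanB : List Char → Int × List Bool
  | [] => (0, [])
  | ch :: rest =>
    let s := pvScanB rest
    if ch = ')' then (s.1 + 1, true :: s.2)
    else if ch = '(' then ((if s.1 > 0 then s.1 - 1 else s.1), true :: s.2)
    else (s.1, decide (s.1 ≠ 0) :: s.2)

-- body of Source B's forward loop
def pvStepB (cs : List Char) (nested : List Bool) (best : Option Int) (p : Int × Char) : Option Int :=
  if PySem.List.pyGetD nested p.1 true = true then best
  else if p.2 = ',' ∨ p.2 = ';' ∨ p.2 = ':' ∨ p.2 = '/' ∨ p.2 = '–' ∨ p.2 = '—' then some p.1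
  else if p.2 = '-' ∧ 0 < p.1 ∧ p.1 < (cs.length : Int) - 1
          ∧ (PySem.List.pyGet? cs (p.1 - 1)).any PySem.Chars.isspace = true
          ∧ (PySem.List.pyGet? cs (p.1 + 1)).any PySem.Chars.isspace = true then some p.1
  else best

def find_last_top_level_separator_py_alt (text : String) : Option Int :=
  let cs := text.toList
  let nested := (pvScanB cs).2
  (PySem.List.enumerate cs 0).foldl (pvStepB cs nested) none

-- ===== PRECONDITION & SPEC =====
def Spec_find_last_top_level_separator_py (text : String) (out : Option Int) : Prop := out = find_last_top_level_separator_py_alt text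
instance (text : String) (out : Option Int) : Decidable (Spec_find_last_top_level_separator_py text out) := by unfold Spec_find_last_top_level_separator_py; infer_instance

-- ===== CLAIM (what is proved, stated in full; the proofs are below) =====
def Claim_equal_find_last_top_level_separator_py : Prop := ∀ (text : String), Dom_find_last_top_level_separator_py text → Spec_find_last_top_level_separator_py text (find_last_top_level_separator_py text)

-- ===== LEMMAS AND PROOFS =====

-- separator test at a position (both programs', phrased once)
def pvSepB (cs : List Char) (k : Nat) : Bool :=
  let ch := cs.getD k ' '
  (ch == ',' || ch == ';' || ch == ':' || ch == '/' || ch == '–' || ch == '—')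
  || (ch == '-' && decide (0 < (k : Int)) && decide ((k : Int) + 1 < (cs.length : Int))
      && (PySem.List.pyGet? cs ((k : Int) - 1)).any PySem.Chars.isspace
      && (PySem.List.pyGet? cs ((k : Int) + 1)).any PySem.Chars.isspace)

-- position k is a top-level separator
def pvCond (cs : List Char) (k : Nat) : Bool :=
  decide ((pvScanB (cs.drop (k + 1))).1 = 0) && pvSepB cs k

-- last index < k that is a top-level separator
def pvLastSep (cs : List Char) : Nat → Option Int
  | 0 => none
  | k + 1 => if pvCond cs k then some (k : Int) else pvLastSep cs k

set_option maxHeartbeats 1000000 in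
theorem pvFindDown_eq (cs : List Char) : ∀ (k : Nat), k ≤ cs.length →
    pvFindDown cs ((cs.take k).reverse) ((k : Int) - 1) ((pvScanB (cs.drop k)).1)
      = pvLastSep cs k := by
  intro k
  induction k with
  | zero => intro _; simp [pvFindDown, pvLastSep]
  | succ k ih =>
    intro h
    have hk : k < cs.length := by omega
    have hIH := ih (by omega)
    have htake : (cs.take (k + 1)).reverse = cs[k] :: (cs.take k).reverse := by
      rw [List.take_succ_eq_append_getElem hk]; simp
    have hdrop : cs.drop k = cs[k] :: cs.drop (k + 1) := List.drop_eq_getElem_cons hk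
    have hch : cs[k]?.getD ' ' = cs[k] := by simp [List.getElem?_eq_getElem hk]
    have hi : ((k + 1 : Nat) : Int) - 1 = (k : Int) := by push_cast; ring
    rw [htake, hi]
    rw [hdrop] at hIH
    by_cases h1 : cs[k] = ')'
    · have hcond : pvCond cs k = false := by simp [pvCond, pvSepB, hch, h1]
      have hIH' : pvFindDown cs (cs.take k).reverse ((k : Int) - 1)
          ((pvScanB (cs.drop (k + 1))).1 + 1) = pvLastSep cs k := by
        simpa [pvScanB, h1] using hIH
      simpa [pvFindDown, pvLastSep, h1, hcond] using hIH'
    · by_cases h2 : cs[k] = '('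
      · have hcond : pvCond cs k = false := by simp [pvCond, pvSepB, hch, h2]
        have hIH' : pvFindDown cs (cs.take k).reverse ((k : Int) - 1)
            (if (pvScanB (cs.drop (k + 1))).1 > 0 then (pvScanB (cs.drop (k + 1))).1 - 1
             else (pvScanB (cs.drop (k + 1))).1) = pvLastSep cs k := by
          simpa [pvScanB, h1, h2] using hIH
        simpa [pvFindDown, pvLastSep, h1, h2, hcond] using hIH'
      · have hd : (pvScanB (cs[k] :: cs.drop (k + 1))).1 = (pvScanB (cs.drop (k + 1))).1 := by
          simp [pvScanB, h1, h2]
        rw [hd] at hIH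
        by_cases h0 : (pvScanB (cs.drop (k + 1))).1 = 0
        · by_cases hs : cs[k] = ',' ∨ cs[k] = ';' ∨ cs[k] = ':' ∨ cs[k] = '/'
          · have hcond : pvCond cs k = true := by
              rcases hs with h3 | h3 | h3 | h3 <;> simp [pvCond, pvSepB, hch, h3, h0]
            simp [pvFindDown, pvLastSep, h1, h2, h0, hs, hcond]
          · by_cases hdash : cs[k] = '–' ∨ cs[k] = '—'
            · have hcond : pvCond cs k = true := by
                rcases hdash with h3 | h3 <;> simp [pvCond, pvSepB, hch, h3, h0]
              simp [pvFindDown, pvLastSep, h1, h2, h0, hs, hdash, hcond]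
            · by_cases hhy : cs[k] = '-' ∧ 0 < (k : Int) ∧ (k : Int) + 1 < (cs.length : Int)
                  ∧ (PySem.List.pyGet? cs ((k : Int) - 1)).any PySem.Chars.isspace = true
                  ∧ (PySem.List.pyGet? cs ((k : Int) + 1)).any PySem.Chars.isspace = true
              · obtain ⟨h3, h4, h5, h6, h7⟩ := hhy
                have h4' : 0 < k := by exact_mod_cast h4
                have h5' : k + 1 < cs.length := by exact_mod_cast h5
                have hne : ¬k = 0 := by omega
                have hcond : pvCond cs k = true := by
                  simp [pvCond, pvSepB, hch, h3, h4', h6, h7, h0] <;> omega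
                simp [pvFindDown, pvLastSep, h0, hs, hdash, h3, h5, h6, h7, hne, hcond]
              · have hsep : pvSepB cs k = false := by
                  by_contra hb
                  rw [Bool.not_eq_false] at hb
                  simp only [pvSepB, List.getD, hch, Bool.or_eq_true, Bool.and_eq_true, beq_iff_eq,
                    decide_eq_true_eq] at hb
                  rcases hb with hb | hb
                  · tauto
                  · exact hhy ⟨hb.1.1.1.1, hb.1.1.1.2, hb.1.1.2, hb.1.2, hb.2⟩
                have hcond : pvCond cs k = false := by simp [pvCond, hsep]
                rw [h0] at hIH ⊢
                simp only [pvFindDown]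
                rw [if_neg h1, if_neg h2, if_neg (by simp : ¬(0 : Int) ≠ 0), if_neg hs,
                  if_neg hdash, if_neg hhy]
                simpa [pvLastSep, hcond] using hIH
        · have hcond : pvCond cs k = false := by simp [pvCond, h0]
          simpa [pvFindDown, pvLastSep, h1, h2, h0, hcond] using hIH

theorem pvMask (cs : List Char) : ∀ (j : Nat), j < cs.length →
    (pvScanB cs).2.getD j true
      = (cs.getD j ' ' == ')' || cs.getD j ' ' == '(' || decide ((pvScanB (cs.drop (j + 1))).1 ≠ 0)) := by
  induction cs with
  | nil => intro j h; simp at h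
  | cons ch rest ih =>
    intro j h
    cases j with
    | zero =>
      by_cases h1 : ch = ')'
      · simp [pvScanB, h1]
      · by_cases h2 : ch = '('
        · simp [pvScanB, h1, h2]
        · simp [pvScanB, h1, h2]
    | succ j =>
      have hj : j < rest.length := by simpa using h
      have := ih j hj
      by_cases h1 : ch = ')'
      · simpa [pvScanB, h1] using this
      · by_cases h2 : ch = '('
        · simpa [pvScanB, h1, h2] using this
        · simpa [pvScanB, h1, h2] using this

set_option maxHeartbeats 1000000 in
theorem pvFold_eq (cs : List Char) : ∀ (k : Nat), k ≤ cs.length →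
    (PySem.List.enumerate (cs.take k) 0).foldl (pvStepB cs (pvScanB cs).2) none
      = pvLastSep cs k := by
  intro k
  induction k with
  | zero => intro _; simp [PySem.List.enumerate_nil, pvLastSep]
  | succ k ih =>
    intro h
    have hk : k < cs.length := by omega
    have hIH := ih (by omega)
    have htake : cs.take (k + 1) = cs.take k ++ [cs[k]] := List.take_succ_eq_append_getElem hk
    have hlen : (cs.take k).length = k := by simp [List.length_take]; omega
    have hch : cs[k]?.getD ' ' = cs[k] := by simp [List.getElem?_eq_getElem hk]
    have hmask := pvMask cs k hk
    rw [htake, PySem.List.enumerate_append, hlen, List.foldl_append, hIH,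
      PySem.List.enumerate_cons, PySem.List.enumerate_nil]
    simp only [List.foldl_cons, List.foldl_nil, zero_add]
    have hget : PySem.List.pyGetD (pvScanB cs).2 ((k : Nat) : Int) true
        = (pvScanB cs).2.getD k true := PySem.List.pyGetD_natCast _ _ _
    by_cases hm : (pvScanB cs).2.getD k true = true
    · have hcond : pvCond cs k = false := by
        rw [hmask] at hm
        simp only [Bool.or_eq_true, beq_iff_eq, decide_eq_true_eq, List.getD, hch] at hm
        rcases hm with (h1 | h1) | h1
        · simp [pvCond, pvSepB, List.getD, hch, h1]
        · simp [pvCond, pvSepB, List.getD, hch, h1]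
        · simp [pvCond, h1]
      have hm2 : (pvScanB cs).2[k]?.getD true = true := by simpa [List.getD] using hm
      simp [pvStepB, hget, hm2, pvLastSep, hcond]
    · rw [hmask] at hm
      simp only [Bool.or_eq_true, beq_iff_eq, decide_eq_true_eq, List.getD, hch, not_or,
        ne_eq, not_not] at hm
      obtain ⟨⟨hp1, hp2⟩, h0⟩ := hm
      have hmaskf : (pvScanB cs).2[k]?.getD true = false := by
        have : (pvScanB cs).2.getD k true = false := by
          rw [hmask]; simp [List.getD, hch, hp1, hp2, h0]
        simpa [List.getD] using this
      by_cases hs : cs[k] = ',' ∨ cs[k] = ';' ∨ cs[k] = ':' ∨ cs[k] = '/' ∨ cs[k] = '–' ∨ cs[k] = '—'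
      · have hcond : pvCond cs k = true := by
          rcases hs with h3 | h3 | h3 | h3 | h3 | h3 <;>
            simp [pvCond, pvSepB, List.getD, hch, h3, h0]
        simp [pvStepB, hget, hmaskf, hs, pvLastSep, hcond]
      · by_cases hhy : cs[k] = '-' ∧ 0 < ((k : Nat) : Int)
            ∧ ((k : Nat) : Int) < (cs.length : Int) - 1
            ∧ (PySem.List.pyGet? cs (((k : Nat) : Int) - 1)).any PySem.Chars.isspace = true
            ∧ (PySem.List.pyGet? cs (((k : Nat) : Int) + 1)).any PySem.Chars.isspace = true
        · obtain ⟨h3, h4, h5, h6, h7⟩ := hhy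
          have h4' : 0 < k := by exact_mod_cast h4
          have h5' : (k : Int) + 1 < (cs.length : Int) := by omega
          have hne : ¬k = 0 := by omega
          have hcond : pvCond cs k = true := by
            simp [pvCond, pvSepB, List.getD, hch, h3, h4', h6, h7, h0] <;> omega
          simp [pvStepB, hget, hmaskf, h3, h5, h6, h7, hne, pvLastSep, hcond]
        · have hsep : pvSepB cs k = false := by
            by_contra hb
            rw [Bool.not_eq_false] at hb
            simp only [pvSepB, List.getD, hch, Bool.or_eq_true, Bool.and_eq_true, beq_iff_eq,
              decide_eq_true_eq] at hb
            rcases hb with hb | hb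
            · tauto
            · obtain ⟨⟨⟨⟨e1, e2⟩, e3⟩, e4⟩, e5⟩ := hb
              exact hhy ⟨e1, e2, by omega, e4, e5⟩
          have hcond : pvCond cs k = false := by simp [pvCond, hsep]
          simp only [pvStepB, hget]
          rw [if_neg (by simp [List.getD, hmaskf]), if_neg hs, if_neg hhy]
          simp [pvLastSep, hcond]

-- ===== VERDICT (by name: the statement is the Claim_ definition above) =====
theorem find_last_top_level_separator_py_spec : Claim_equal_find_last_top_level_separator_py := by
  intro text _
  unfold Spec_find_last_top_level_separator_py
  unfold find_last_top_level_separator_py find_last_top_level_separator_py_alt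
  have hA := pvFindDown_eq text.toList text.toList.length le_rfl
  have hB := pvFold_eq text.toList text.toList.length le_rfl
  simp only [List.take_length, List.drop_length, pvScanB] at hA hB
  rw [hA, hB]
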